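-- pv_equiv track=rewrite | github.com/TomKite57/advent_of_code_2016 | py_scripts/day_09.py | full_decompress
-- ===== SOURCE A (Python) =====
-- from copy import deepcopy
--
-- def get_marker(line, ind1):
--     if line[ind1] != '(':
--         return
--     ind2 = deepcopy(ind1)
--     while line[ind2] != ')':
--         ind2 += 1
--
--     a, b = [int(x) for x in line[ind1+1:ind2].split('x')]
--     return ind1, ind2, a, b
--
-- def full_decompress(line):
--     ind = 0
--     while ind < len(line):
--         if line[ind] == '(':
--             _, ind2, a, b = get_marker(line, ind)
--             line = line[:ind] + line[ind2+1:ind2+1+a]*(b-1) + line[ind2+1:]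
--             continue
--         ind+=1
--     return line
-- ===== SOURCE B (Python) =====
-- def full_decompress(line):
--     # Recursive decompression: expand each marker's chunk recursively, repeat it,
--     # and join the pieces once at the end (no repeated whole-string splicing).
--     pieces = []
--     i = 0
--     n = len(line)
--     while i < n:
--         c = line[i]
--         if c == '(':
--             j = line.index(')', i)
--             a, b = [int(x) for x in line[i + 1:j].split('x')]
--             chunk = line[j + 1:j + 1 + a]
--             pieces.append(full_decompress(chunk) * b)
--             i = j + 1 + a
--         else:
--             pieces.append(c)
--             i += 1
--     return ''.join(pieces)
-- ===== Notes on version B (the rewrite author's own statement) =====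
-- stated objective: faster
-- what changed: A repeatedly splices each expansion back into the whole string and rescans from the marker position; B decompresses recursively (each marker's chunk decompressed once, repeated b times), collecting pieces and joining once at the end.
-- outside the precondition, e.g. on full_decompress('(1x0)z'): A returns 'z', B returns ''; on full_decompress('(-1x2)ab'): A returns 'ab', B returns ')ab'
import Mathlib
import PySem

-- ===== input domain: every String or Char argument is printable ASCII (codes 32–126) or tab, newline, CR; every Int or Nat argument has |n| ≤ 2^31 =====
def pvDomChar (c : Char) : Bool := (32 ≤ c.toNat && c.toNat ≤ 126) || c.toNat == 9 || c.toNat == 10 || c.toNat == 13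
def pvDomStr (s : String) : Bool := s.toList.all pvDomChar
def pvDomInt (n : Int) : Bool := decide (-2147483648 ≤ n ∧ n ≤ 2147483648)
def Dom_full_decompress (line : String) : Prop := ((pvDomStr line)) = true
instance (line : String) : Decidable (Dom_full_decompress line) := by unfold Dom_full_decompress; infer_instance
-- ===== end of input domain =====

-- B replaces A's repeated whole-string splicing (re-scanned from the marker each time) by
-- recursive decompression of each marker's chunk, joining the pieces once at the end.

-- ===== PORT A =====
-- shared marker scanner: A's get_marker scan 'while line[ind2] != ")"' and the
-- 'interior.split("x")' + int() parse (int() via PySem.Int.ofChars?, exact).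
def splitParen : List Char → Option (List Char × List Char)
  | [] => none
  | c :: r =>
    if c = ')' then some ([], r)
    else
      match splitParen r with
      | some (i, rest) => some (c :: i, rest)
      | none => none

def parseInter (inter : List Char) : Option (Int × Int) :=
  match inter.splitOn 'x' with
  | [sa, sb] =>
    match PySem.Int.ofChars? sa, PySem.Int.ofChars? sb with
    | some a, some b => some (a, b)
    | _, _ => none
  | _ => none

def parseMarker (r : List Char) : Option (Int × Int × List Char) :=
  (splitParen r).bind fun p => (parseInter p.1).map fun q => (q.1, q.2, p.2)

-- fuel bound for A's while loop (proved sufficient under Pre_; the loop itself is runA below);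
-- fueled structurally by the string length, which always suffices (costF_stable below)
def costF : Nat → List Char → Nat
  | 0, _ => 0
  | fuel + 1, l =>
    match l with
    | [] => 0
    | c :: r =>
      if c = '(' then
        match parseMarker r with
        | some (a, b, rest) =>
          1 + (max b.toNat 1) * costF fuel (rest.take a.toNat) + costF fuel (rest.drop a.toNat)
        | none => 1 + costF fuel r
      else 1 + costF fuel r

def cost (l : List Char) : Nat := costF l.length l

-- A's while loop: ind walks the (mutating) string; on '(' the marker is spliced out and
-- the chunk repeated (b-1) extra times, ind unchanged.  line[ind2+1:ind2+1+a] = rest.take a.toNat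
-- (Python slice clamps: empty for a ≤ 0, truncated at the end), line[ind2+1:] = rest.
def runA : Nat → List Char → Nat → List Char
  | 0, line, _ => line
  | fuel + 1, line, ind =>
    if ind < line.length then
      if line.getD ind ' ' = '(' then
        match parseMarker (line.drop (ind + 1)) with
        | some (a, b, rest) =>
          runA fuel
            (line.take ind ++ (List.replicate (b - 1).toNat (rest.take a.toNat)).flatten ++ rest)
            ind
        | none => line      -- A raises here (no ')' / malformed marker): outside Pre_
      else runA fuel line (ind + 1)
    else line

def full_decompress (line : String) : String :=
  String.ofList (runA (cost line.toList) line.toList 0)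

-- ===== PORT B =====
-- Source B: walk once; on '(' parse the marker, recursively decompress the a-char chunk,
-- repeat it b times ('' for b ≤ 0, as Python's str*int), continue after the chunk.
-- Fueled structurally by the string length (always sufficient: each recursive call shrinks
-- the list); the fuel only makes the recursion total, the steps are Source B's.
def decompBF : Nat → List Char → List Char
  | 0, _ => []
  | fuel + 1, l =>
    match l with
    | [] => []
    | c :: r =>
      if c = '(' then
        match parseMarker r with
        | some (a, b, rest) =>
          (List.replicate b.toNat (decompBF fuel (rest.take a.toNat))).flatten ++
            decompBF fuel (rest.drop a.toNat)
        | none => c :: decompBF fuel r     -- Source B raises here: outside Pre_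
      else c :: decompBF fuel r

def decompB (l : List Char) : List Char := decompBF l.length l

def full_decompress_alt (line : String) : String :=
  String.ofList (decompB line.toList)

-- ===== PRECONDITION & SPEC =====
-- Pre_: well-formed marker structure, a grammar/shape condition on the input (NOT a run of either
-- algorithm): every '(' starts '(AxB)' with int()-parsable A ≥ 0 and B ≥ 1, A not reaching past
-- the remaining text except at top level (there Python's slice truncation is harmless and both
-- programs agree).  Pre_ excludes the inputs on which A raises (unclosed '(' / malformed marker)
-- or loops forever, and the degenerate markers no puzzle input contains — repeat count B ≤ 0 or
-- negative length A — corners where the two implementations' slice/repeat arithmetic produces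
-- different incidental values (see the cited examples in the claim).
-- spec-side marker shape at the head of r (after a '('): interior = chars before the first ')',
-- split at 'x' into two int()-parsable parts; equal to the ports' parse (parseMarker_eq_markerAt)
def markerAt (r : List Char) : Option (Int × Int × List Char) :=
  if ((r.takeWhile (fun c => c != ')')).length < r.length) then
    match (r.takeWhile (fun c => c != ')')).splitOn 'x' with
    | [sa, sb] =>
      match PySem.Int.ofChars? sa, PySem.Int.ofChars? sb with
      | some a, some b => some (a, b, r.drop ((r.takeWhile (fun c => c != ')')).length + 1))
      | _, _ => none
    | _ => none
  else none

-- fueled structurally by the string length, which always suffices (wfAuxF_stable below)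
def wfAuxF : Nat → Bool → List Char → Bool
  | 0, _, _ => true
  | fuel + 1, top, l =>
    match l with
    | [] => true
    | c :: r =>
      if c = '(' then
        match markerAt r with
        | some (a, b, rest) =>
          decide (0 ≤ a) && decide (1 ≤ b) &&
          (if a ≤ (rest.length : Int) then
             wfAuxF fuel false (rest.take a.toNat) && wfAuxF fuel top (rest.drop a.toNat)
           else top && wfAuxF fuel false rest)
        | none => false
      else wfAuxF fuel top r

def wfAux (top : Bool) (l : List Char) : Bool := wfAuxF l.length top l

def Pre_full_decompress (line : String) : Prop := wfAux true line.toList = true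
instance (line : String) : Decidable (Pre_full_decompress line) := by
  unfold Pre_full_decompress; infer_instance

def pvWitness_full_decompress : String := "ab(2x3)cd"

def Spec_full_decompress (line : String) (out : String) : Prop :=
  out = full_decompress_alt line
instance (line : String) (out : String) : Decidable (Spec_full_decompress line out) := by
  unfold Spec_full_decompress; infer_instance

-- ===== CLAIM (what is proved, stated in full; the proofs are below) =====
def Claim_equal_full_decompress : Prop := ∀ (line : String), Dom_full_decompress line → Pre_full_decompress line → Spec_full_decompress line (full_decompress line)

-- ===== LEMMAS AND PROOFS =====

theorem splitParen_length {r i rest} (h : splitParen r = some (i, rest)) :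
    rest.length < r.length := by
  induction r generalizing i rest with
  | nil => simp [splitParen] at h
  | cons c r ih =>
    simp only [splitParen] at h
    split at h
    · cases h; simp
    · cases hs : splitParen r with
      | none => rw [hs] at h; cases h
      | some p =>
        obtain ⟨i', rest'⟩ := p
        rw [hs] at h
        cases h
        have := ih hs
        simp; omega

theorem parseMarker_length {r a b rest} (h : parseMarker r = some (a, b, rest)) :
    rest.length < r.length := by
  unfold parseMarker at h
  cases hs : splitParen r with
  | none => rw [hs] at h; cases h
  | some p =>
    obtain ⟨inter, rest'⟩ := p
    rw [hs] at h
    simp only [Option.bind] at h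
    cases hpi : parseInter inter with
    | none => rw [hpi] at h; cases h
    | some q =>
      rw [hpi] at h
      simp only [Option.map_some] at h
      cases h
      exact splitParen_length hs

theorem splitParen_eq (r : List Char) :
    splitParen r =
      (if ((r.takeWhile (fun c => c != ')')).length < r.length) then
        some (r.takeWhile (fun c => c != ')'),
          r.drop ((r.takeWhile (fun c => c != ')')).length + 1))
      else none) := by
  induction r with
  | nil => simp [splitParen]
  | cons c r ih =>
    by_cases hc : c = ')'
    · subst hc
      simp [splitParen]
    · have hpc : ((c != ')') = true) := by simp [hc]
      simp only [splitParen, if_neg hc, List.takeWhile_cons, hpc, if_true, ih]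
      by_cases h1 : (r.takeWhile (fun c => c != ')')).length < r.length
      · rw [if_pos h1, if_pos (by simp; omega)]
        simp
      · rw [if_neg h1, if_neg (by simp; omega)]

theorem markerAt_length {r : List Char} {a b : Int} {rest : List Char}
    (hp : markerAt r = some (a, b, rest)) : rest.length < r.length := by
  unfold markerAt at hp
  split_ifs at hp with h1
  split at hp
  · split at hp
    · cases hp
      simp only [List.length_drop]
      omega
    · cases hp
  · cases hp

theorem parseMarker_eq_markerAt (r : List Char) : parseMarker r = markerAt r := by
  unfold parseMarker markerAt
  rw [splitParen_eq]
  by_cases h1 : (r.takeWhile (fun c => c != ')')).length < r.length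
  · simp only [if_pos h1, Option.bind]
    unfold parseInter
    cases hsp : (r.takeWhile (fun c => c != ')')).splitOn 'x' with
    | nil => simp
    | cons sa t =>
      cases t with
      | nil => simp
      | cons sb t2 =>
        cases t2 with
        | nil =>
          cases ha : PySem.Int.ofChars? sa with
          | none => simp [ha]
          | some a' =>
            cases hb : PySem.Int.ofChars? sb with
            | none => simp [ha, hb]
            | some b' => simp [ha, hb]
        | cons u t3 => simp
  · simp [if_neg h1]

-- stability: any fuel ≥ the list length computes the same value
theorem costF_stable : ∀ (f1 f2 : Nat) (l : List Char), l.length ≤ f1 → l.length ≤ f2 →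
    costF f1 l = costF f2 l := by
  intro f1
  induction f1 with
  | zero =>
    intro f2 l h1 h2
    have hl : l = [] := List.length_eq_zero_iff.mp (Nat.le_zero.mp h1)
    subst hl
    cases f2 <;> rfl
  | succ f ih =>
    intro f2 l h1 h2
    cases l with
    | nil => cases f2 <;> rfl
    | cons c r =>
      cases f2 with
      | zero => simp at h2
      | succ g =>
        have hr : r.length ≤ f := by simp at h1; omega
        have hrg : r.length ≤ g := by simp at h2; omega
        simp only [costF]
        by_cases hc : c = '('
        · simp only [if_pos hc]
          cases hp : parseMarker r with
          | none =>
            show 1 + costF f r = 1 + costF g r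
            rw [ih g r hr hrg]
          | some t =>
            obtain ⟨a, b, rest⟩ := t
            have hlen := parseMarker_length hp
            have h1' : (rest.take a.toNat).length ≤ f := by
              simp [List.length_take]; omega
            have h1g : (rest.take a.toNat).length ≤ g := by
              simp [List.length_take]; omega
            have h2' : (rest.drop a.toNat).length ≤ f := by simp; omega
            have h2g : (rest.drop a.toNat).length ≤ g := by simp; omega
            show 1 + max b.toNat 1 * costF f (rest.take a.toNat) + costF f (rest.drop a.toNat) =
              1 + max b.toNat 1 * costF g (rest.take a.toNat) + costF g (rest.drop a.toNat)
            rw [ih g _ h1' h1g, ih g _ h2' h2g]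
        · simp only [if_neg hc]
          show 1 + costF f r = 1 + costF g r
          rw [ih g r hr hrg]

theorem decompBF_stable : ∀ (f1 f2 : Nat) (l : List Char), l.length ≤ f1 → l.length ≤ f2 →
    decompBF f1 l = decompBF f2 l := by
  intro f1
  induction f1 with
  | zero =>
    intro f2 l h1 h2
    have hl : l = [] := List.length_eq_zero_iff.mp (Nat.le_zero.mp h1)
    subst hl
    cases f2 <;> rfl
  | succ f ih =>
    intro f2 l h1 h2
    cases l with
    | nil => cases f2 <;> rfl
    | cons c r =>
      cases f2 with
      | zero => simp at h2
      | succ g =>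
        have hr : r.length ≤ f := by simp at h1; omega
        have hrg : r.length ≤ g := by simp at h2; omega
        simp only [decompBF]
        by_cases hc : c = '('
        · simp only [if_pos hc]
          cases hp : parseMarker r with
          | none =>
            show c :: decompBF f r = c :: decompBF g r
            rw [ih g r hr hrg]
          | some t =>
            obtain ⟨a, b, rest⟩ := t
            have hlen := parseMarker_length hp
            have h1' : (rest.take a.toNat).length ≤ f := by
              simp [List.length_take]; omega
            have h1g : (rest.take a.toNat).length ≤ g := by
              simp [List.length_take]; omega
            have h2' : (rest.drop a.toNat).length ≤ f := by simp; omega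
            have h2g : (rest.drop a.toNat).length ≤ g := by simp; omega
            show (List.replicate b.toNat (decompBF f (rest.take a.toNat))).flatten ++
                decompBF f (rest.drop a.toNat) =
              (List.replicate b.toNat (decompBF g (rest.take a.toNat))).flatten ++
                decompBF g (rest.drop a.toNat)
            rw [ih g _ h1' h1g, ih g _ h2' h2g]
        · simp only [if_neg hc]
          show c :: decompBF f r = c :: decompBF g r
          rw [ih g r hr hrg]

theorem wfAuxF_stable : ∀ (f1 f2 : Nat) (t : Bool) (l : List Char), l.length ≤ f1 → l.length ≤ f2 →
    wfAuxF f1 t l = wfAuxF f2 t l := by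
  intro f1
  induction f1 with
  | zero =>
    intro f2 t l h1 h2
    have hl : l = [] := List.length_eq_zero_iff.mp (Nat.le_zero.mp h1)
    subst hl
    cases f2 <;> rfl
  | succ f ih =>
    intro f2 t l h1 h2
    cases l with
    | nil => cases f2 <;> rfl
    | cons c r =>
      cases f2 with
      | zero => simp at h2
      | succ g =>
        have hr : r.length ≤ f := by simp at h1; omega
        have hrg : r.length ≤ g := by simp at h2; omega
        simp only [wfAuxF]
        by_cases hc : c = '('
        · simp only [if_pos hc]
          cases hp : markerAt r with
          | none => rfl
          | some tr =>
            obtain ⟨a, b, rest⟩ := tr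
            have hlen := markerAt_length hp
            have h1' : (rest.take a.toNat).length ≤ f := by
              simp [List.length_take]; omega
            have h1g : (rest.take a.toNat).length ≤ g := by
              simp [List.length_take]; omega
            have h2' : (rest.drop a.toNat).length ≤ f := by simp; omega
            have h2g : (rest.drop a.toNat).length ≤ g := by simp; omega
            have h3' : rest.length ≤ f := by omega
            have h3g : rest.length ≤ g := by omega
            show (decide (0 ≤ a) && decide (1 ≤ b) &&
               (if a ≤ (rest.length : Int) then
                  wfAuxF f false (rest.take a.toNat) && wfAuxF f t (rest.drop a.toNat)
                else t && wfAuxF f false rest)) =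
              (decide (0 ≤ a) && decide (1 ≤ b) &&
               (if a ≤ (rest.length : Int) then
                  wfAuxF g false (rest.take a.toNat) && wfAuxF g t (rest.drop a.toNat)
                else t && wfAuxF g false rest))
            rw [ih g false _ h1' h1g, ih g t _ h2' h2g, ih g false rest h3' h3g]
        · simp only [if_neg hc]
          show wfAuxF f t r = wfAuxF g t r
          rw [ih g t r hr hrg]

-- derived one-step equations
theorem cost_nil : cost [] = 0 := rfl

theorem cost_char {c : Char} {r : List Char} (h : ¬ c = '(') : cost (c :: r) = 1 + cost r := by
  simp only [cost, List.length_cons, costF, if_neg h]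

theorem cost_marker {r : List Char} {a b : Int} {rest : List Char}
    (hp : parseMarker r = some (a, b, rest)) :
    cost ('(' :: r) =
      1 + (max b.toNat 1) * cost (rest.take a.toNat) + cost (rest.drop a.toNat) := by
  have hlen := parseMarker_length hp
  have h1 : (rest.take a.toNat).length ≤ r.length := by simp [List.length_take]; omega
  have h2 : (rest.drop a.toNat).length ≤ r.length := by simp; omega
  simp only [cost, List.length_cons, costF, hp, reduceIte]
  rw [costF_stable r.length (rest.take a.toNat).length _ h1 le_rfl,
      costF_stable r.length (rest.drop a.toNat).length _ h2 le_rfl]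

theorem cost_pos {c : Char} {r : List Char} : 1 ≤ cost (c :: r) := by
  by_cases hc : c = '('
  · subst hc
    cases hp : parseMarker r with
    | none => simp only [cost, List.length_cons, costF, hp, reduceIte]; omega
    | some t =>
      obtain ⟨a, b, rest⟩ := t
      rw [cost_marker hp]; omega
  · rw [cost_char hc]; omega

theorem decompB_nil : decompB [] = [] := rfl

theorem decompB_char {c : Char} {r : List Char} (h : ¬ c = '(') :
    decompB (c :: r) = c :: decompB r := by
  simp only [decompB, List.length_cons, decompBF, if_neg h]

theorem decompB_marker {r : List Char} {a b : Int} {rest : List Char}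
    (hp : parseMarker r = some (a, b, rest)) :
    decompB ('(' :: r) =
      (List.replicate b.toNat (decompB (rest.take a.toNat))).flatten ++
        decompB (rest.drop a.toNat) := by
  have hlen := parseMarker_length hp
  have h1 : (rest.take a.toNat).length ≤ r.length := by simp [List.length_take]; omega
  have h2 : (rest.drop a.toNat).length ≤ r.length := by simp; omega
  simp only [decompB, List.length_cons, decompBF, hp, reduceIte]
  rw [decompBF_stable r.length (rest.take a.toNat).length _ h1 le_rfl,
      decompBF_stable r.length (rest.drop a.toNat).length _ h2 le_rfl]

theorem wfAux_char {t : Bool} {c : Char} {r : List Char} (h : ¬ c = '(') :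
    wfAux t (c :: r) = wfAux t r := by
  simp only [wfAux, List.length_cons, wfAuxF, if_neg h]

theorem wfAux_marker_none {t : Bool} {r : List Char} (hp : parseMarker r = none) :
    wfAux t ('(' :: r) = false := by
  rw [parseMarker_eq_markerAt] at hp
  simp only [wfAux, List.length_cons, wfAuxF, hp, reduceIte]

theorem wfAux_marker {t : Bool} {r : List Char} {a b : Int} {rest : List Char}
    (hp : parseMarker r = some (a, b, rest)) :
    wfAux t ('(' :: r) =
      (decide (0 ≤ a) && decide (1 ≤ b) &&
       (if a ≤ (rest.length : Int) then
          wfAux false (rest.take a.toNat) && wfAux t (rest.drop a.toNat)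
        else t && wfAux false rest)) := by
  rw [parseMarker_eq_markerAt] at hp
  have hlen := markerAt_length hp
  have h1 : (rest.take a.toNat).length ≤ r.length := by simp [List.length_take]; omega
  have h2 : (rest.drop a.toNat).length ≤ r.length := by simp; omega
  have h3 : rest.length ≤ r.length := by omega
  simp only [wfAux, List.length_cons, wfAuxF, hp, reduceIte]
  rw [wfAuxF_stable r.length (rest.take a.toNat).length false _ h1 le_rfl,
      wfAuxF_stable r.length (rest.drop a.toNat).length t _ h2 le_rfl,
      wfAuxF_stable r.length rest.length false rest h3 le_rfl]

theorem splitParen_append {r i rest : List Char} (t : List Char)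
    (h : splitParen r = some (i, rest)) :
    splitParen (r ++ t) = some (i, rest ++ t) := by
  induction r generalizing i rest with
  | nil => simp [splitParen] at h
  | cons c r ih =>
    simp only [splitParen, List.cons_append] at h ⊢
    split at h
    · next hc =>
      cases h
      simp [hc]
    · next hc =>
      cases hs : splitParen r with
      | none => rw [hs] at h; cases h
      | some p =>
        obtain ⟨i', rest'⟩ := p
        rw [hs] at h
        cases h
        rw [if_neg hc, ih hs]

theorem parseMarker_append {r : List Char} {a b : Int} {rest : List Char} (t : List Char)
    (h : parseMarker r = some (a, b, rest)) :
    parseMarker (r ++ t) = some (a, b, rest ++ t) := by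
  unfold parseMarker at h ⊢
  cases hs : splitParen r with
  | none => rw [hs] at h; cases h
  | some p =>
    obtain ⟨inter, rest'⟩ := p
    rw [hs] at h
    simp only [Option.bind] at h
    rw [splitParen_append t hs]
    simp only [Option.bind]
    cases hpi : parseInter inter with
    | none => rw [hpi] at h; cases h
    | some q =>
      rw [hpi] at h
      simp only [Option.map_some] at h
      cases h
      rfl

theorem wf_append : ∀ (N : Nat) (u : List Char), u.length ≤ N → wfAux false u = true →
    ∀ (m : Bool) (v : List Char), wfAux m v = true → wfAux m (u ++ v) = true := by
  intro N
  induction N with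
  | zero =>
    intro u h1 hu m v hv
    have hl : u = [] := List.length_eq_zero_iff.mp (Nat.le_zero.mp h1)
    subst hl; simpa using hv
  | succ N ih =>
    intro u h1 hu m v hv
    cases u with
    | nil => simpa using hv
    | cons c r =>
      by_cases hc : c = '('
      · subst hc
        cases hp : parseMarker r with
        | none => rw [wfAux_marker_none hp] at hu; cases hu
        | some tr =>
          obtain ⟨a, b, rest⟩ := tr
          have hlen := parseMarker_length hp
          rw [wfAux_marker hp] at hu
          simp only [Bool.and_eq_true] at hu
          obtain ⟨hab, hif⟩ := hu
          have hal : a ≤ (rest.length : Int) := by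
            by_contra hal
            rw [if_neg hal] at hif
            simp at hif
          rw [if_pos hal] at hif
          simp only [Bool.and_eq_true] at hif
          obtain ⟨hchunk, htail⟩ := hif
          have haN : a.toNat ≤ rest.length := by
            simp only [decide_eq_true_eq] at hab
            omega
          rw [List.cons_append, wfAux_marker (parseMarker_append v hp)]
          have htk : (rest ++ v).take a.toNat = rest.take a.toNat :=
            List.take_append_of_le_length haN
          have hdr : (rest ++ v).drop a.toNat = rest.drop a.toNat ++ v :=
            List.drop_append_of_le_length haN
          have hal' : a ≤ ((rest ++ v).length : Int) := by
            simp only [List.length_append]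
            omega
          rw [if_pos hal', htk, hdr]
          simp only [Bool.and_eq_true]
          refine ⟨hab, hchunk, ?_⟩
          have hd : (rest.drop a.toNat).length ≤ N := by simp at h1 ⊢; omega
          exact ih _ hd htail m v hv
      · rw [wfAux_char hc] at hu
        rw [List.cons_append, wfAux_char hc]
        have : r.length ≤ N := by simp at h1; omega
        exact ih r this hu m v hv

theorem decomp_append : ∀ (N : Nat) (u : List Char), u.length ≤ N → wfAux false u = true →
    ∀ (v : List Char), decompB (u ++ v) = decompB u ++ decompB v := by
  intro N
  induction N with
  | zero =>
    intro u h1 hu v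
    have hl : u = [] := List.length_eq_zero_iff.mp (Nat.le_zero.mp h1)
    subst hl; simp [decompB_nil]
  | succ N ih =>
    intro u h1 hu v
    cases u with
    | nil => simp [decompB_nil]
    | cons c r =>
      by_cases hc : c = '('
      · subst hc
        cases hp : parseMarker r with
        | none => rw [wfAux_marker_none hp] at hu; cases hu
        | some tr =>
          obtain ⟨a, b, rest⟩ := tr
          have hlen := parseMarker_length hp
          rw [wfAux_marker hp] at hu
          simp only [Bool.and_eq_true] at hu
          obtain ⟨hab, hif⟩ := hu
          have hal : a ≤ (rest.length : Int) := by
            by_contra hal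
            rw [if_neg hal] at hif
            simp at hif
          rw [if_pos hal] at hif
          simp only [Bool.and_eq_true] at hif
          have haN : a.toNat ≤ rest.length := by
            simp only [decide_eq_true_eq] at hab
            omega
          have htk : (rest ++ v).take a.toNat = rest.take a.toNat :=
            List.take_append_of_le_length haN
          have hdr : (rest ++ v).drop a.toNat = rest.drop a.toNat ++ v :=
            List.drop_append_of_le_length haN
          rw [List.cons_append, decompB_marker (parseMarker_append v hp), htk, hdr,
              decompB_marker hp]
          have hd : (rest.drop a.toNat).length ≤ N := by simp at h1 ⊢; omega
          rw [ih _ hd hif.2 v, List.append_assoc]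
      · rw [List.cons_append, decompB_char hc, decompB_char hc]
        rw [wfAux_char hc] at hu
        have : r.length ≤ N := by simp at h1; omega
        rw [ih r this hu v, List.cons_append]

theorem cost_append : ∀ (N : Nat) (u : List Char), u.length ≤ N → wfAux false u = true →
    ∀ (v : List Char), cost (u ++ v) = cost u + cost v := by
  intro N
  induction N with
  | zero =>
    intro u h1 hu v
    have hl : u = [] := List.length_eq_zero_iff.mp (Nat.le_zero.mp h1)
    subst hl; simp [cost_nil]
  | succ N ih =>
    intro u h1 hu v
    cases u with
    | nil => simp [cost_nil]
    | cons c r =>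
      by_cases hc : c = '('
      · subst hc
        cases hp : parseMarker r with
        | none => rw [wfAux_marker_none hp] at hu; cases hu
        | some tr =>
          obtain ⟨a, b, rest⟩ := tr
          have hlen := parseMarker_length hp
          rw [wfAux_marker hp] at hu
          simp only [Bool.and_eq_true] at hu
          obtain ⟨hab, hif⟩ := hu
          have hal : a ≤ (rest.length : Int) := by
            by_contra hal
            rw [if_neg hal] at hif
            simp at hif
          rw [if_pos hal] at hif
          simp only [Bool.and_eq_true] at hif
          have haN : a.toNat ≤ rest.length := by
            simp only [decide_eq_true_eq] at hab
            omega
          have htk : (rest ++ v).take a.toNat = rest.take a.toNat :=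
            List.take_append_of_le_length haN
          have hdr : (rest ++ v).drop a.toNat = rest.drop a.toNat ++ v :=
            List.drop_append_of_le_length haN
          rw [List.cons_append, cost_marker (parseMarker_append v hp), htk, hdr,
              cost_marker hp]
          have hd : (rest.drop a.toNat).length ≤ N := by simp at h1 ⊢; omega
          rw [ih _ hd hif.2 v]
          ring
      · rw [List.cons_append, cost_char hc, cost_char hc]
        rw [wfAux_char hc] at hu
        have : r.length ≤ N := by simp at h1; omega
        rw [ih r this hu v]
        ring

-- flatten-replicate versions
theorem wf_flat {u : List Char} (hu : wfAux false u = true) :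
    ∀ (n : Nat) {m : Bool} {v : List Char}, wfAux m v = true →
      wfAux m ((List.replicate n u).flatten ++ v) = true := by
  intro n
  induction n with
  | zero => intro m v hv; simpa using hv
  | succ n ih =>
    intro m v hv
    rw [List.replicate_succ, List.flatten_cons, List.append_assoc]
    exact wf_append u.length u le_rfl hu m _ (ih hv)

theorem decomp_flat {u : List Char} (hu : wfAux false u = true) :
    ∀ (n : Nat) (v : List Char),
      decompB ((List.replicate n u).flatten ++ v) =
        (List.replicate n (decompB u)).flatten ++ decompB v := by
  intro n
  induction n with
  | zero => intro v; simp
  | succ n ih =>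
    intro v
    rw [List.replicate_succ, List.flatten_cons, List.append_assoc,
        decomp_append u.length u le_rfl hu, ih v, List.replicate_succ, List.flatten_cons,
        List.append_assoc]

theorem cost_flat {u : List Char} (hu : wfAux false u = true) :
    ∀ (n : Nat) (v : List Char),
      cost ((List.replicate n u).flatten ++ v) = n * cost u + cost v := by
  intro n
  induction n with
  | zero => intro v; simp
  | succ n ih =>
    intro v
    rw [List.replicate_succ, List.flatten_cons, List.append_assoc,
        cost_append u.length u le_rfl hu, ih v]
    ring

theorem flat_shift (u v : List Char) (n : Nat) :
    (List.replicate n u).flatten ++ (u ++ v) = (List.replicate (n + 1) u).flatten ++ v := by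
  rw [List.replicate_succ', List.flatten_append]
  simp [List.append_assoc]

theorem getD_append_cons (p : List Char) (c : Char) (r : List Char) :
    (p ++ c :: r).getD p.length ' ' = c := by
  simp [List.getD]

theorem main_lemma :
    ∀ (N : Nat) (s : List Char), cost s ≤ N → wfAux true s = true →
      ∀ (p : List Char) (fuel : Nat), cost s ≤ fuel →
        runA fuel (p ++ s) p.length = p ++ decompB s := by
  intro N
  induction N with
  | zero =>
    intro s hc hw p fuel hf
    cases s with
    | nil =>
      cases fuel with
      | zero => simp [runA, decompB_nil]
      | succ f => simp [runA, decompB_nil]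
    | cons c r => have := cost_pos (c := c) (r := r); omega
  | succ N ih =>
    intro s hc hw p fuel hf
    cases s with
    | nil =>
      cases fuel with
      | zero => simp [runA, decompB_nil]
      | succ f => simp [runA, decompB_nil]
    | cons c r =>
      have hpos : 1 ≤ cost (c :: r) := cost_pos
      cases fuel with
      | zero => omega
      | succ f =>
        by_cases hcc : c = '('
        · subst hcc
          cases hp : parseMarker r with
          | none => rw [wfAux_marker_none hp] at hw; cases hw
          | some tr =>
            obtain ⟨a, b, rest⟩ := tr
            have hlen := parseMarker_length hp
            rw [wfAux_marker hp] at hw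
            simp only [Bool.and_eq_true, decide_eq_true_eq] at hw
            obtain ⟨⟨ha, hb1⟩, hif⟩ := hw
            -- extract wf of chunk and tail (both branches)
            have hkey : wfAux false (rest.take a.toNat) = true ∧
                wfAux true (rest.drop a.toNat) = true := by
              split at hif
              · next hal =>
                simp only [Bool.and_eq_true] at hif
                exact ⟨hif.1, hif.2⟩
              · next hal =>
                simp only [Bool.and_eq_true] at hif
                have htk : rest.take a.toNat = rest := by
                  apply List.take_of_length_le
                  omega
                have hdr : rest.drop a.toNat = [] := by
                  apply List.drop_eq_nil_of_le
                  omega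
                rw [htk, hdr]
                exact ⟨hif.2, rfl⟩
            obtain ⟨hwc, hwt⟩ := hkey
            -- one step of A's loop
            have hstep : runA (f + 1) (p ++ '(' :: r) p.length =
                runA f (p ++ ((List.replicate (b - 1).toNat (rest.take a.toNat)).flatten ++ rest))
                  p.length := by
              rw [runA]
              rw [if_pos (by simp)]
              rw [getD_append_cons, if_pos rfl]
              have hdrop : (p ++ '(' :: r).drop (p.length + 1) = r := by
                have : p ++ '(' :: r = (p ++ ['(']) ++ r := by simp
                rw [this]
                have hplen : p.length + 1 = (p ++ ['(']).length := by simp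
                rw [hplen, List.drop_left]
              rw [hdrop, hp]
              have htake : (p ++ '(' :: r).take p.length = p := List.take_left
              show runA f ((p ++ '(' :: r).take p.length ++
                  (List.replicate (b - 1).toNat (rest.take a.toNat)).flatten ++ rest) p.length =
                runA f (p ++ ((List.replicate (b - 1).toNat (rest.take a.toNat)).flatten ++ rest))
                  p.length
              rw [htake, List.append_assoc]
            rw [hstep]
            -- rewrite the new suffix
            have hrest : rest = rest.take a.toNat ++ rest.drop a.toNat :=
              (List.take_append_drop _ _).symm
            have hsuffix : (List.replicate (b - 1).toNat (rest.take a.toNat)).flatten ++ rest =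
                (List.replicate b.toNat (rest.take a.toNat)).flatten ++ rest.drop a.toNat := by
              have hfs := flat_shift (rest.take a.toNat) (rest.drop a.toNat) (b - 1).toNat
              rw [List.take_append_drop] at hfs
              rw [hfs, show (b - 1).toNat + 1 = b.toNat by omega]
            rw [hsuffix]
            -- invariants of the new suffix
            have hwf' : wfAux true
                ((List.replicate b.toNat (rest.take a.toNat)).flatten ++ rest.drop a.toNat) =
                true := wf_flat hwc b.toNat hwt
            have hcost' : cost
                ((List.replicate b.toNat (rest.take a.toNat)).flatten ++ rest.drop a.toNat) =
                b.toNat * cost (rest.take a.toNat) + cost (rest.drop a.toNat) :=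
              cost_flat hwc b.toNat _
            have hcs : cost ('(' :: r) =
                1 + b.toNat * cost (rest.take a.toNat) + cost (rest.drop a.toNat) := by
              rw [cost_marker hp]
              have : max b.toNat 1 = b.toNat := by omega
              rw [this]
            rw [ih _ (by omega) hwf' p f (by omega)]
            rw [decomp_flat hwc b.toNat _, decompB_marker hp]
        · -- ordinary character
          have hstep : runA (f + 1) (p ++ c :: r) p.length =
              runA f (p ++ c :: r) (p.length + 1) := by
            rw [runA]
            rw [if_pos (by simp), getD_append_cons, if_neg hcc]
          rw [hstep]
          have hsplit : p ++ c :: r = (p ++ [c]) ++ r := by simp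
          have hplen : p.length + 1 = (p ++ [c]).length := by simp
          rw [hsplit, hplen]
          rw [wfAux_char hcc] at hw
          have hcr : cost (c :: r) = 1 + cost r := cost_char hcc
          rw [ih r (by omega) hw (p ++ [c]) f (by omega)]
          rw [decompB_char hcc]
          simp

-- ===== VERDICT (by name: the statement is the Claim_ definition above) =====
theorem full_decompress_spec : Claim_equal_full_decompress := by
  intro line hDom hPre
  show full_decompress line = full_decompress_alt line
  unfold full_decompress full_decompress_alt
  have hm := main_lemma (cost line.toList) line.toList le_rfl hPre [] (cost line.toList) le_rfl
  simp only [List.nil_append, List.length_nil] at hm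
  rw [hm]
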